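-- pv_equiv track=rewrite | github.com/JiIJu/algorithm_algorithm | 학사 지이주/2023/3월/0301/더 맵게.py | solution
-- ===== SOURCE A (Python) =====
-- import heapq
--
-- def solution(scoville, K):
--     answer = 0
--     heapq.heapify(scoville)
--     if scoville[0]>=K:
--         return 0
--     while scoville[0]<K:
--         if len(scoville)<2:
--             return -1
--         a = heapq.heappop(scoville)
--         b = heapq.heappop(scoville)
--         c = a+b*2
--         heapq.heappush(scoville,c)
--         answer+=1
--     return answer
-- ===== SOURCE B (Python) =====
-- def solution(scoville, K):
--     # Sorted-list re-implementation (no heap): keep the pot list in ascending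
--     # order, repeatedly combine the two smallest and insert the mix back in
--     # place.  Return-value equivalent to A; unlike A it does not mutate the
--     # caller's list (A heapifies it in place).
--     s = sorted(scoville)
--     answer = 0
--     while s[0] < K:
--         if len(s) < 2:
--             return -1
--         c = s[0] + 2 * s[1]
--         rest = s[2:]
--         i = 0
--         while i < len(rest) and rest[i] < c:
--             i += 1
--         rest.insert(i, c)
--         s = rest
--         answer += 1
--     return answer
-- ===== Notes on version B (the rewrite author's own statement) =====
-- stated objective: alternative
-- what changed: Replaces the binary heap (heapify/heappop/heappush) with a plain ascending sorted list: sort once, then each round take the two head elements and re-insert their mix by a linear insertion scan; B also leaves the caller's list unmutated where A heapifies it in place.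
import Mathlib
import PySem

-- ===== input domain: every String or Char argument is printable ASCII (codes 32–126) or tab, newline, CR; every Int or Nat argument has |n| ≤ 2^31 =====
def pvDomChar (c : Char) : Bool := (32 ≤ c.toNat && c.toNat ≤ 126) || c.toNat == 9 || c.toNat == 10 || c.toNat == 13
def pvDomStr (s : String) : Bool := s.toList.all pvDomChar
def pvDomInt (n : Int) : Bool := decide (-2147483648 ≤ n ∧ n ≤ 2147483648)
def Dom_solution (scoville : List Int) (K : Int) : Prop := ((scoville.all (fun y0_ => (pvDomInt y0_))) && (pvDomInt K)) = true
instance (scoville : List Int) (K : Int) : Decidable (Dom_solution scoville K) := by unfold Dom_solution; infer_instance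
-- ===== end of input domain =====

-- B replaces A's binary heap with a sorted list (return values equal; A additionally
-- heapifies the caller's list in place, B leaves it unchanged — equivalence is about the
-- return value).

-- ===== PORT A =====
-- A uses the `heapq` module; its functions (CPython's _siftdown/_siftup/heapify/
-- heappush/heappop) are ported by hand below, step for step, on List Int
-- (heap.getD i 0 reads heap[i]; all call sites keep indices in range).  Each while
-- loop carries an explicit fuel counter, passed in large enough at every call site
-- (a totality guard only: with the fuel provided, the fuel-0 arm is never reached).

-- CPython _siftdown(heap, startpos, pos): percolate `newitem` (= heap[pos]) up.
-- Exact, except that newitem is passed as an argument instead of being read from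
-- heap[pos], and the locals parentpos/parent are inlined (each write of the loop,
-- and the final heap[pos] = newitem, coincide).  Fuel: pos strictly decreases.
def siftdown : Nat → List Int → Nat → Nat → Int → List Int
  | 0, heap, _, pos, newitem => heap.set pos newitem
  | fuel + 1, heap, startpos, pos, newitem =>
    if startpos < pos then
      if newitem < heap.getD ((pos - 1) / 2) 0 then
        siftdown fuel (heap.set pos (heap.getD ((pos - 1) / 2) 0)) startpos
          ((pos - 1) / 2) newitem
      else heap.set pos newitem
    else heap.set pos newitem

-- CPython _siftup's while-loop (move the smaller child up until pos is a leaf),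
-- followed by heap[pos] = newitem; _siftdown(heap, startpos, pos); the local
-- childpos is inlined.  Fuel: heap.length - pos strictly decreases.
def siftupLoop : Nat → List Int → Nat → Nat → Int → List Int
  | 0, heap, startpos, pos, newitem => siftdown pos heap startpos pos newitem
  | fuel + 1, heap, startpos, pos, newitem =>
    if 2 * pos + 1 < heap.length then
      siftupLoop fuel
        (heap.set pos (heap.getD
          (if 2 * pos + 2 < heap.length ∧
              ¬ (heap.getD (2 * pos + 1) 0 < heap.getD (2 * pos + 2) 0)
            then 2 * pos + 2 else 2 * pos + 1) 0))
        startpos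
        (if 2 * pos + 2 < heap.length ∧
            ¬ (heap.getD (2 * pos + 1) 0 < heap.getD (2 * pos + 2) 0)
          then 2 * pos + 2 else 2 * pos + 1)
        newitem
    else siftdown pos heap startpos pos newitem

-- CPython _siftup(heap, pos)
def siftup (heap : List Int) (pos : Nat) : List Int :=
  siftupLoop heap.length heap pos pos (heap.getD pos 0)

-- CPython heappush: heap.append(item); _siftdown(heap, 0, len(heap)-1)
def heappush (heap : List Int) (item : Int) : List Int :=
  siftdown heap.length (heap ++ [item]) 0 heap.length item

-- CPython heappop: lastelt = heap.pop(); if heap: returnitem = heap[0];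
-- heap[0] = lastelt; _siftup(heap, 0); return returnitem; return lastelt
-- (A only calls it on heaps of length ≥ 2, so the pop of the last element is in range).
def heappop (heap : List Int) : Int × List Int :=
  let lastelt := heap.getD (heap.length - 1) 0
  let rest := heap.dropLast
  if rest.length ≠ 0 then
    (rest.getD 0 0, siftup (rest.set 0 lastelt) 0)
  else (lastelt, [])

-- CPython heapify: for i in reversed(range(n//2)): _siftup(heap, i)
def heapify (heap : List Int) : List Int :=
  ((List.range (heap.length / 2)).reverse).foldl (fun h i => siftup h i) heap

-- the while-loop of A's solution; fuel: the heap shrinks by one element per round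
def loopA : Nat → Int → List Int → Int → Int
  | 0, K, heap, answer => if heap.getD 0 0 < K then -1 else answer
  | fuel + 1, K, heap, answer =>
    if heap.getD 0 0 < K then
      if heap.length < 2 then -1
      else
        let p1 := heappop heap
        let p2 := heappop p1.2
        loopA fuel K (heappush p2.2 (p1.1 + p2.1 * 2)) (answer + 1)
    else answer

def solution (scoville : List Int) (K : Int) : Int :=
  let h := heapify scoville
  if h.getD 0 0 ≥ K then 0 else loopA h.length K h 0

-- ===== PORT B =====
-- Source B's inner while-loop + insert: scan past the elements < c, insert c there
-- (ported as the structural recursion on the list).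
def insortB (s : List Int) (c : Int) : List Int :=
  match s with
  | [] => [c]
  | y :: t => if c ≤ y then c :: y :: t else y :: insortB t c

-- Source B's while-loop; fuel: the list shrinks by one element per round
def loopB : Nat → Int → List Int → Int → Int
  | 0, K, s, answer => if s.getD 0 0 < K then -1 else answer
  | fuel + 1, K, s, answer =>
    if s.getD 0 0 < K then
      if s.length < 2 then -1
      else loopB fuel K (insortB (s.drop 2) (s.getD 0 0 + 2 * s.getD 1 0)) (answer + 1)
    else answer

def solution_alt (scoville : List Int) (K : Int) : Int :=
  let s := PySem.List.sorted scoville (fun x => x) false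
  loopB s.length K s 0

-- ===== PRECONDITION & SPEC =====
-- Pre_ excludes only the empty list, on which both A and B raise IndexError at scoville[0].
def Pre_solution (scoville : List Int) (K : Int) : Prop := scoville ≠ []
instance (scoville : List Int) (K : Int) : Decidable (Pre_solution scoville K) := by
  unfold Pre_solution; infer_instance

def pvWitness_solution : List Int × Int := ([1, 2, 3, 9, 10, 12], 7)

def Spec_solution (scoville : List Int) (K : Int) (out : Int) : Prop := out = solution_alt scoville K
instance (scoville : List Int) (K : Int) (out : Int) : Decidable (Spec_solution scoville K out) := by unfold Spec_solution; infer_instance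

-- ===== CLAIM (what is proved, stated in full; the proofs are below) =====
def Claim_equal_solution : Prop := ∀ (scoville : List Int) (K : Int), Dom_solution scoville K → Pre_solution scoville K → Spec_solution scoville K (solution scoville K)

-- ===== LEMMAS AND PROOFS =====

-- getD/set bookkeeping
theorem getD_set_self (l : List Int) (i : Nat) (a : Int) (h : i < l.length) :
    (l.set i a).getD i 0 = a := by
  simp [List.getD, h]

theorem getD_set_ne (l : List Int) (i j : Nat) (a : Int) (h : i ≠ j) :
    (l.set i a).getD j 0 = l.getD j 0 := by
  simp [List.getD, h]

theorem set_getD_self_eq (l : List Int) (i : Nat) :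
    l.set i (l.getD i 0) = l := by
  by_cases h : i < l.length
  · apply List.ext_getElem <;> simp [List.getD, List.getElem?_eq_getElem h]
  · rw [List.set_eq_of_length_le (by omega)]

-- swapping two set-writes is a permutation
theorem cons_set_swap (a b : Int) : ∀ (t : List Int) (j : Nat), j < t.length →
    (a :: t.set j b).Perm (b :: t.set j a) := by
  intro t
  induction t with
  | nil => simp
  | cons x t ih =>
    intro j hj
    cases j with
    | zero => simpa using List.Perm.swap b a t
    | succ k =>
      simp only [List.set_cons_succ]
      exact ((List.Perm.swap x a _).trans (((ih k (by simpa using hj)).cons x))).trans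
        (List.Perm.swap b x _)

theorem set_set_swap (l : List Int) : ∀ (i j : Nat) (a b : Int), i < l.length → j < l.length →
    i ≠ j → ((l.set i a).set j b).Perm ((l.set i b).set j a) := by
  induction l with
  | nil => simp
  | cons x t ih =>
    intro i j a b hi hj hij
    cases i with
    | zero =>
      cases j with
      | zero => omega
      | succ k =>
        simp only [List.set_cons_zero, List.set_cons_succ]
        exact cons_set_swap a b t k (by simpa using hj)
    | succ m =>
      cases j with
      | zero =>
        simp only [List.set_cons_zero, List.set_cons_succ]
        exact cons_set_swap b a t m (by simpa using hi)
      | succ k =>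
        simp only [List.set_cons_succ]
        exact (ih m k a b (by simpa using hi) (by simpa using hj) (by omega)).cons x

theorem set_move_perm (l : List Int) (i j : Nat) (x : Int)
    (hi : i < l.length) (hj : j < l.length) (hij : i ≠ j) :
    ((l.set i (l.getD j 0)).set j x).Perm (l.set i x) := by
  have h1 := set_set_swap l i j (l.getD j 0) x hi hj hij
  have h2 : (l.set i x).set j (l.getD j 0) = l.set i x := by
    have h3 : l.getD j 0 = (l.set i x).getD j 0 := (getD_set_ne l i j x hij).symm
    rw [h3, set_getD_self_eq]
  exact h2 ▸ h1

-- length bookkeeping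
theorem length_siftdown : ∀ (fuel : Nat) (heap : List Int) (s p : Nat) (x : Int),
    (siftdown fuel heap s p x).length = heap.length := by
  intro fuel
  induction fuel with
  | zero => intro heap s p x; simp [siftdown]
  | succ fuel ih => intro heap s p x; simp only [siftdown]; split_ifs <;> simp [ih]

theorem length_siftupLoop : ∀ (fuel : Nat) (heap : List Int) (s p : Nat) (x : Int),
    (siftupLoop fuel heap s p x).length = heap.length := by
  intro fuel
  induction fuel with
  | zero => intro heap s p x; simp [siftupLoop, length_siftdown]
  | succ fuel ih =>
    intro heap s p x
    simp only [siftupLoop]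
    split_ifs <;> simp [ih, length_siftdown]

theorem length_heappop_snd (heap : List Int) :
    (heappop heap).2.length = heap.length - 1 := by
  unfold heappop siftup
  dsimp only
  split <;> simp_all [length_siftupLoop]

theorem length_heappush (heap : List Int) (x : Int) :
    (heappush heap x).length = heap.length + 1 := by
  simp [heappush, length_siftdown]

theorem length_insortB (s : List Int) (c : Int) :
    (insortB s c).length = s.length + 1 := by
  induction s with
  | nil => simp [insortB]
  | cons y t ih => simp only [insortB]; split <;> simp [ih]

-- permutation facts about the heap operations
theorem siftdown_perm : ∀ (fuel : Nat) (heap : List Int) (s p : Nat) (x : Int),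
    p < heap.length → (siftdown fuel heap s p x).Perm (heap.set p x) := by
  intro fuel
  induction fuel with
  | zero => intro heap s p x hp; simp only [siftdown]; exact List.Perm.refl _
  | succ fuel ih =>
    intro heap s p x hp
    simp only [siftdown]
    split_ifs with hsp hlt
    · exact (ih _ s _ x (by simp only [List.length_set]; omega)).trans
        (set_move_perm heap p ((p - 1) / 2) x hp (by omega) (by omega))
    · exact List.Perm.refl _
    · exact List.Perm.refl _

theorem siftupLoop_perm : ∀ (fuel : Nat) (heap : List Int) (s p : Nat) (x : Int),
    p < heap.length → (siftupLoop fuel heap s p x).Perm (heap.set p x) := by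
  intro fuel
  induction fuel with
  | zero => intro heap s p x hp; simp only [siftupLoop]; exact siftdown_perm p heap s p x hp
  | succ fuel ih =>
    intro heap s p x hp
    simp only [siftupLoop]
    set cp := if 2 * p + 2 < heap.length ∧
        ¬ (heap.getD (2 * p + 1) 0 < heap.getD (2 * p + 2) 0)
      then 2 * p + 2 else 2 * p + 1 with hcp
    split_ifs with hc
    · have hcl : cp < heap.length := by rw [hcp]; split <;> omega
      have hgt : p < cp := by rw [hcp]; split <;> omega
      exact (ih _ s _ x (by simp only [List.length_set]; omega)).trans
        (set_move_perm heap p cp x hp hcl (by omega))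
    · exact siftdown_perm p heap s p x hp

theorem siftup_perm (heap : List Int) (p : Nat) (hp : p < heap.length) :
    (siftup heap p).Perm heap := by
  have := siftupLoop_perm heap.length heap p p (heap.getD p 0) hp
  rwa [set_getD_self_eq] at this

-- ancestor chain (positions a percolation can visit above `p` within the subtree of `s`)
def Anc (s p : Nat) : Prop :=
  if p = s then True
  else if p = 0 then False
  else Anc s ((p - 1) / 2)
termination_by p
decreasing_by omega

theorem anc_le (s : Nat) : ∀ p, Anc s p → s ≤ p := by
  intro p
  induction p using Nat.strong_induction_on with
  | _ p ih =>
    intro h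
    unfold Anc at h
    split at h
    · omega
    · split at h
      · exact h.elim
      · have := ih ((p - 1) / 2) (by omega) h
        omega

theorem anc_step (s p : Nat) (h : Anc s p) (hlt : s < p) : Anc s ((p - 1) / 2) := by
  unfold Anc at h
  split at h
  · omega
  · split at h
    · exact h.elim
    · exact h

theorem anc_zero : ∀ p, Anc 0 p := by
  intro p
  induction p using Nat.strong_induction_on with
  | _ p ih =>
    unfold Anc
    split
    · trivial
    · exact ih ((p - 1) / 2) (by omega)

-- partial heap property: every parent/child pair whose parent index is ≥ k is ordered
def PH (k : Nat) (h : List Int) : Prop :=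
  ∀ j : Nat, 0 < j → j < h.length → k ≤ (j - 1) / 2 →
    h.getD ((j - 1) / 2) 0 ≤ h.getD j 0

-- percolate-up correctness
theorem siftdown_PH : ∀ (fuel : Nat) (heap : List Int) (s p : Nat) (x : Int),
    p < heap.length → p ≤ fuel → Anc s p →
    (∀ j, 0 < j → j < heap.length → j ≠ p → (j - 1) / 2 ≠ p → s ≤ (j - 1) / 2 →
      heap.getD ((j - 1) / 2) 0 ≤ heap.getD j 0) →
    (∀ c, 0 < c → c < heap.length → (c - 1) / 2 = p → x ≤ heap.getD c 0) →
    (s < p → ∀ c, 0 < c → c < heap.length → (c - 1) / 2 = p →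
      heap.getD ((p - 1) / 2) 0 ≤ heap.getD c 0) →
    PH s (siftdown fuel heap s p x) := by
  intro fuel
  induction fuel with
  | zero =>
    intro heap s p x hp hf hanc hii hiii hiv
    have hps : p = s := by
      have := anc_le s p hanc
      omega
    simp only [siftdown]
    intro j hj0 hjlen hsj
    simp only [List.length_set] at hjlen
    have hj : j ≠ p := by omega
    by_cases hcj : (j - 1) / 2 = p
    · rw [hcj, getD_set_self _ _ _ hp, getD_set_ne _ _ _ _ (by omega : p ≠ j)]
      exact hiii j hj0 hjlen hcj
    · rw [getD_set_ne _ _ _ _ (by omega : p ≠ (j - 1) / 2),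
        getD_set_ne _ _ _ _ (by omega : p ≠ j)]
      exact hii j hj0 hjlen hj hcj hsj
  | succ fuel ih =>
    intro heap s p x hp hf hanc hii hiii hiv
    simp only [siftdown]
    split_ifs with hsp hlt
    · -- recursion step: the hole moves to the parent
      have hanc' : Anc s ((p - 1) / 2) := anc_step s p hanc hsp
      have hspar : s ≤ (p - 1) / 2 := anc_le s ((p - 1) / 2) hanc'
      apply ih
      · simp only [List.length_set]; omega
      · omega
      · exact hanc'
      · intro j hj0 hjlen hjne hparne hsj
        simp only [List.length_set] at hjlen
        by_cases hj : j = p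
        · exact absurd (by omega : (j - 1) / 2 = (p - 1) / 2) hparne
        · by_cases hcj : (j - 1) / 2 = p
          · rw [hcj, getD_set_self _ _ _ hp, getD_set_ne _ _ _ _ (by omega : p ≠ j)]
            exact hiv hsp j hj0 hjlen hcj
          · rw [getD_set_ne _ _ _ _ (by omega : p ≠ (j - 1) / 2),
              getD_set_ne _ _ _ _ (by omega : p ≠ j)]
            exact hii j hj0 hjlen hj hcj hsj
      · intro c hc0 hclen hcpar
        simp only [List.length_set] at hclen
        by_cases hc : c = p
        · rw [hc, getD_set_self _ _ _ hp]
          exact le_of_lt hlt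
        · rw [getD_set_ne _ _ _ _ (by omega : p ≠ c)]
          have h2 : heap.getD ((c - 1) / 2) 0 ≤ heap.getD c 0 :=
            hii c hc0 hclen hc (by omega) (by omega)
          rw [hcpar] at h2
          exact le_trans (le_of_lt hlt) h2
      · intro hsp' c hc0 hclen hcpar
        simp only [List.length_set] at hclen
        have hanc'' : Anc s (((p - 1) / 2 - 1) / 2) := anc_step s ((p - 1) / 2) hanc' hsp'
        have hspp : s ≤ ((p - 1) / 2 - 1) / 2 := anc_le _ _ hanc''
        have hkey : heap.getD (((p - 1) / 2 - 1) / 2) 0 ≤ heap.getD ((p - 1) / 2) 0 :=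
          hii ((p - 1) / 2) (by omega) (by omega) (by omega) (by omega) hspp
        rw [getD_set_ne _ _ _ _ (by omega : p ≠ ((p - 1) / 2 - 1) / 2)]
        by_cases hc : c = p
        · rw [hc, getD_set_self _ _ _ hp]
          exact hkey
        · rw [getD_set_ne _ _ _ _ (by omega : p ≠ c)]
          refine le_trans hkey ?_
          have := hii c hc0 hclen hc (by omega) (by rw [hcpar]; exact hspar)
          rwa [hcpar] at this
    · -- stop: newitem is not smaller than its parent
      intro j hj0 hjlen hsj
      simp only [List.length_set] at hjlen
      by_cases hj : j = p
      · rw [hj, getD_set_ne _ _ _ _ (by omega : p ≠ (p - 1) / 2), getD_set_self _ _ _ hp]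
        omega
      · by_cases hcj : (j - 1) / 2 = p
        · rw [hcj, getD_set_self _ _ _ hp, getD_set_ne _ _ _ _ (by omega : p ≠ j)]
          exact hiii j hj0 hjlen hcj
        · rw [getD_set_ne _ _ _ _ (by omega : p ≠ (j - 1) / 2),
            getD_set_ne _ _ _ _ (by omega : p ≠ j)]
          exact hii j hj0 hjlen hj hcj hsj
    · -- stop: pos = startpos
      have hps : p = s := by
        have := anc_le s p hanc
        omega
      intro j hj0 hjlen hsj
      simp only [List.length_set] at hjlen
      have hj : j ≠ p := by omega
      by_cases hcj : (j - 1) / 2 = p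
      · rw [hcj, getD_set_self _ _ _ hp, getD_set_ne _ _ _ _ (by omega : p ≠ j)]
        exact hiii j hj0 hjlen hcj
      · rw [getD_set_ne _ _ _ _ (by omega : p ≠ (j - 1) / 2),
          getD_set_ne _ _ _ _ (by omega : p ≠ j)]
        exact hii j hj0 hjlen hj hcj hsj

-- sift-to-leaf-then-up correctness
theorem siftupLoop_PH : ∀ (fuel : Nat) (heap : List Int) (s p : Nat) (x : Int),
    p < heap.length → heap.length ≤ fuel + p → Anc s p →
    (∀ j, 0 < j → j < heap.length → j ≠ p → (j - 1) / 2 ≠ p → s ≤ (j - 1) / 2 →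
      heap.getD ((j - 1) / 2) 0 ≤ heap.getD j 0) →
    (s < p → ∀ c, 0 < c → c < heap.length → (c - 1) / 2 = p →
      heap.getD ((p - 1) / 2) 0 ≤ heap.getD c 0) →
    PH s (siftupLoop fuel heap s p x) := by
  intro fuel
  induction fuel with
  | zero =>
    intro heap s p x hp hf
    exact absurd hp (by omega)
  | succ fuel ih =>
    intro heap s p x hp hf hanc hii hiv
    simp only [siftupLoop]
    set cp := if 2 * p + 2 < heap.length ∧
        ¬ (heap.getD (2 * p + 1) 0 < heap.getD (2 * p + 2) 0)
      then 2 * p + 2 else 2 * p + 1 with hcp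
    split_ifs with hc
    · have hcl : cp < heap.length := by rw [hcp]; split <;> omega
      have hgt : p < cp := by rw [hcp]; split <;> omega
      have hparc : (cp - 1) / 2 = p := by rw [hcp]; split <;> omega
      have hsp0 : s ≤ p := anc_le s p hanc
      have hsmall : ∀ j, 0 < j → j < heap.length → (j - 1) / 2 = p → j ≠ cp →
          heap.getD cp 0 ≤ heap.getD j 0 := by
        intro j hj0 hjlen hjpar hjne
        by_cases hcond : 2 * p + 2 < heap.length ∧
            ¬ (heap.getD (2 * p + 1) 0 < heap.getD (2 * p + 2) 0)
        · have hc2 : cp = 2 * p + 2 := by rw [hcp, if_pos hcond]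
          have hjne' : j ≠ 2 * p + 2 := hc2 ▸ hjne
          have hj : j = 2 * p + 1 := by omega
          rw [hc2, hj]
          exact le_of_not_gt hcond.2
        · have hc2 : cp = 2 * p + 1 := by rw [hcp, if_neg hcond]
          have hjne' : j ≠ 2 * p + 1 := hc2 ▸ hjne
          have hj : j = 2 * p + 2 := by omega
          rw [hc2, hj]
          refine le_of_lt ?_
          rcases not_and_or.mp hcond with h2 | h2
          · exact absurd (hj ▸ hjlen) h2
          · exact not_not.mp h2
      apply ih
      · simp only [List.length_set]; exact hcl
      · simp only [List.length_set]; omega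
      · unfold Anc
        rw [if_neg (by omega : ¬ cp = s), if_neg (by omega : ¬ cp = 0), hparc]
        exact hanc
      · intro j hj0 hjlen hjne hparne hsj
        simp only [List.length_set] at hjlen
        by_cases hj : j = p
        · have hsp : s < p := by omega
          rw [hj, getD_set_ne _ _ _ _ (by omega : p ≠ (p - 1) / 2), getD_set_self _ _ _ hp]
          exact hiv hsp cp (by omega) hcl hparc
        · by_cases hcj : (j - 1) / 2 = p
          · rw [hcj, getD_set_self _ _ _ hp, getD_set_ne _ _ _ _ (by omega : p ≠ j)]
            exact hsmall j hj0 hjlen hcj hjne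
          · rw [getD_set_ne _ _ _ _ (by omega : p ≠ (j - 1) / 2),
              getD_set_ne _ _ _ _ (by omega : p ≠ j)]
            exact hii j hj0 hjlen hj hcj hsj
      · intro _ d hd0 hdlen hdpar
        simp only [List.length_set] at hdlen
        have hdgt : cp < d := by omega
        rw [hparc, getD_set_self _ _ _ hp, getD_set_ne _ _ _ _ (by omega : p ≠ d)]
        have := hii d hd0 hdlen (by omega) (by omega) (by omega)
        rwa [hdpar] at this
    · exact siftdown_PH p heap s p x hp (le_refl p) hanc hii
        (fun c hc0 hclen hcpar => absurd hclen (by omega))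
        (fun _ c hc0 hclen hcpar => absurd hclen (by omega))

theorem siftup_PH (heap : List Int) (p : Nat) (hp : p < heap.length)
    (h : PH (p + 1) heap) : PH p (siftup heap p) := by
  unfold siftup
  apply siftupLoop_PH heap.length heap p p _ hp (by omega)
  · unfold Anc; simp
  · intro j hj0 hjlen hjne hparne hsj
    exact h j hj0 hjlen (by omega)
  · intro hlt
    exact absurd hlt (lt_irrefl p)

theorem heapify_fold (l : List Int) : ∀ (k : Nat) (h : List Int), h.length = l.length →
    k ≤ l.length / 2 → PH k h → h.Perm l →
    PH 0 ((List.range k).reverse.foldl (fun h i => siftup h i) h) ∧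
      ((List.range k).reverse.foldl (fun h i => siftup h i) h).Perm l := by
  intro k
  induction k with
  | zero => intro h hlen _ hPH hperm; exact ⟨hPH, hperm⟩
  | succ k ihk =>
    intro h hlen hk hPH hperm
    have hkl : k < h.length := by omega
    have hstep : (List.range (k + 1)).reverse.foldl (fun h i => siftup h i) h =
        (List.range k).reverse.foldl (fun h i => siftup h i) (siftup h k) := by
      rw [List.range_succ, List.reverse_append]
      rfl
    rw [hstep]
    have hlen' : (siftup h k).length = l.length := by
      unfold siftup; rw [length_siftupLoop]; exact hlen
    exact ihk (siftup h k) hlen' (by omega) (siftup_PH h k hkl hPH)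
      ((siftup_perm h k hkl).trans hperm)

theorem heapify_spec (l : List Int) :
    PH 0 (heapify l) ∧ (heapify l).Perm l := by
  unfold heapify
  exact heapify_fold l (l.length / 2) l rfl (le_refl _)
    (fun j hj0 hjlen hsj => absurd hjlen (by omega)) (List.Perm.refl l)

theorem PH0_min (h : List Int) (hh : PH 0 h) : ∀ i, i < h.length → h.getD 0 0 ≤ h.getD i 0 := by
  intro i
  induction i using Nat.strong_induction_on with
  | _ i ihi =>
    intro hi
    rcases Nat.eq_zero_or_pos i with h0 | h0
    · rw [h0]
    · exact le_trans (ihi ((i - 1) / 2) (by omega) (by omega)) (hh i h0 hi (by omega))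

theorem head_eq_of_perm_sorted (h s : List Int) (hh : PH 0 h)
    (hs : s.Pairwise (· ≤ ·)) (hperm : h.Perm s) (hne : h ≠ []) :
    h.getD 0 0 = s.getD 0 0 := by
  obtain ⟨hd, tl, rfl⟩ := List.exists_cons_of_ne_nil hne
  cases s with
  | nil => exact absurd hperm.length_eq (by simp)
  | cons y ts =>
    simp only [List.getD_cons_zero]
    have h1 : hd ≤ y := by
      have hy : y ∈ hd :: tl := hperm.mem_iff.mpr (List.mem_cons_self)
      obtain ⟨i, hi, hyi⟩ := List.mem_iff_getElem.mp hy
      have := PH0_min (hd :: tl) hh i hi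
      rwa [List.getD_eq_getElem _ _ hi, hyi, List.getD_cons_zero] at this
    have h2 : y ≤ hd := by
      have hx : hd ∈ y :: ts := hperm.mem_iff.mp List.mem_cons_self
      rcases List.mem_cons.mp hx with he | ht
      · omega
      · exact List.rel_of_pairwise_cons hs ht
    omega

theorem getD_dropLast (l : List Int) (k : Nat) (hk : k < l.length - 1) :
    l.dropLast.getD k 0 = l.getD k 0 := by
  rw [List.getD_eq_getElem _ _ (by simp; omega), List.getD_eq_getElem _ _ (by omega),
    List.getElem_dropLast]

theorem getD_append_left (l₁ l₂ : List Int) (k : Nat) (hk : k < l₁.length) :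
    (l₁ ++ l₂).getD k 0 = l₁.getD k 0 := by
  rw [List.getD_eq_getElem _ _ (by simp; omega), List.getD_eq_getElem _ _ hk,
    List.getElem_append_left hk]

theorem heappop_spec (h : List Int) (hh : PH 0 h) (hne : h ≠ []) :
    (heappop h).1 = h.getD 0 0 ∧ (heappop h).2.Perm h.tail ∧ PH 0 (heappop h).2 := by
  obtain ⟨hd, tl, rfl⟩ := List.exists_cons_of_ne_nil hne
  unfold heappop
  dsimp only
  cases tl with
  | nil =>
    rw [if_neg (by simp)]
    refine ⟨by simp, List.Perm.refl _, ?_⟩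
    intro j hj0 hjlen hsj
    simp at hjlen
  | cons t0 ts =>
    have hlen : (hd :: t0 :: ts).length - 1 = (t0 :: ts).length := by simp
    have hrest : (hd :: t0 :: ts).dropLast = hd :: (t0 :: ts).dropLast := by
      simp [List.dropLast_cons₂]
    have hrlen : (hd :: t0 :: ts).dropLast.length ≠ 0 := by simp
    rw [if_pos hrlen]
    set lastelt := (hd :: t0 :: ts).getD ((hd :: t0 :: ts).length - 1) 0 with hlast
    have hlast2 : lastelt = (t0 :: ts).getLast (by simp) := by
      rw [hlast]
      rw [show (hd :: t0 :: ts).length - 1 = ((t0 :: ts).length - 1) + 1 by simp]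
      rw [List.getD_cons_succ]
      rw [List.getD_eq_getElem _ _ (by simp), List.getLast_eq_getElem]
      rfl
    have htail_perm : ((hd :: t0 :: ts).dropLast.set 0 lastelt).Perm (t0 :: ts) := by
      rw [hrest]
      have hset : (hd :: (t0 :: ts).dropLast).set 0 lastelt =
          lastelt :: (t0 :: ts).dropLast := by simp
      rw [hset, hlast2]
      conv_rhs => rw [← List.dropLast_concat_getLast (show t0 :: ts ≠ [] by simp)]
      exact (List.perm_append_singleton _ _).symm
    constructor
    · rw [hrest]
      simp
    constructor
    · refine (siftup_perm _ 0 ?_).trans htail_perm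
      simp
    · apply siftup_PH _ 0 (by simp)
      intro j hj0 hjlen hsj
      have hj3 : 1 ≤ (j - 1) / 2 := hsj
      have hj0' : 3 ≤ j := by omega
      rw [getD_set_ne _ _ _ _ (by omega), getD_set_ne _ _ _ _ (by omega)]
      simp only [List.length_set] at hjlen
      have hjlen' : j < (hd :: t0 :: ts).length - 1 := by
        simpa using hjlen
      rw [getD_dropLast _ _ (by omega), getD_dropLast _ _ hjlen']
      exact hh j hj0 (by omega) (by omega)

theorem heappush_spec (h : List Int) (x : Int) (hh : PH 0 h) :
    PH 0 (heappush h x) ∧ (heappush h x).Perm (x :: h) := by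
  unfold heappush
  have hn : h.length < (h ++ [x]).length := by simp
  constructor
  · apply siftdown_PH h.length _ _ _ _ hn (le_refl _) (anc_zero _)
    · intro j hj0 hjlen hjne hparne _
      have hjl : j < h.length := by simp at hjlen; omega
      rw [getD_append_left _ _ _ (by omega), getD_append_left _ _ _ hjl]
      exact hh j hj0 hjl (by omega)
    · intro c hc0 hclen hcpar
      simp at hclen; omega
    · intro _ c hc0 hclen hcpar
      simp at hclen; omega
  · have hperm := siftdown_perm h.length (h ++ [x]) 0 h.length x hn
    have hself : (h ++ [x]).set h.length x = h ++ [x] := by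
      apply List.ext_getElem
      · simp
      · intro k hk1 hk2
        rw [List.getElem_set]
        split
        · next hk => subst hk; rw [List.getElem_append_right (le_refl _)]; simp
        · rfl
    rw [hself] at hperm
    exact hperm.trans (List.perm_append_singleton _ _)

theorem insortB_perm (s : List Int) (c : Int) : (insortB s c).Perm (c :: s) := by
  induction s with
  | nil => simp [insortB]
  | cons y t ih =>
    simp only [insortB]
    split
    · exact List.Perm.refl _
    · exact (ih.cons y).trans (List.Perm.swap c y t)

theorem insortB_pairwise (s : List Int) (c : Int) (hs : s.Pairwise (· ≤ ·)) :
    (insortB s c).Pairwise (· ≤ ·) := by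
  induction s with
  | nil => simp [insortB]
  | cons y t ih =>
    simp only [insortB]
    rcases List.pairwise_cons.mp hs with ⟨hy, ht⟩
    split
    · next hcy =>
      refine List.pairwise_cons.mpr ⟨?_, hs⟩
      intro b hb
      rcases List.mem_cons.mp hb with rfl | hbt
      · exact hcy
      · exact le_trans hcy (hy b hbt)
    · next hcy =>
      refine List.pairwise_cons.mpr ⟨?_, ih ht⟩
      intro b hb
      rcases List.mem_cons.mp ((insortB_perm t c).mem_iff.mp hb) with rfl | h1
      · omega
      · exact hy b h1

theorem loop_eq (K : Int) : ∀ (fa fb : Nat) (h s : List Int) (ans : Int),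
    h.length ≤ fa → s.length ≤ fb →
    PH 0 h → s.Pairwise (· ≤ ·) → h.Perm s → loopA fa K h ans = loopB fb K s ans := by
  intro fa
  induction fa with
  | zero =>
    intro fb h s ans hfa hfb hPH hsorted hperm
    have h0 : h = [] := by
      cases h with
      | nil => rfl
      | cons a t => simp at hfa
    subst h0
    have hs0 : s = [] := by
      have := hperm.length_eq
      exact (List.length_eq_zero_iff.mp this.symm)
    subst hs0
    cases fb with
    | zero => rfl
    | succ m =>
      simp only [loopA, loopB, List.length_nil]
      split_ifs <;> first | rfl | omega
  | succ fa ih =>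
    intro fb h s ans hfa hfb hPH hsorted hperm
    by_cases hne : h = []
    · subst hne
      have hs0 : s = [] := by
        have := hperm.length_eq
        exact (List.length_eq_zero_iff.mp this.symm)
      subst hs0
      cases fb with
      | zero =>
        simp only [loopA, loopB, List.length_nil]
        split_ifs <;> first | rfl | omega
      | succ m =>
        simp only [loopA, loopB, List.length_nil]
        split_ifs <;> first | rfl | omega
    · cases fb with
      | zero =>
        exfalso
        have hpos : 0 < h.length := List.length_pos_of_ne_nil hne
        have hl := hperm.length_eq
        omega
      | succ fb =>
        simp only [loopA, loopB]
        have hhead : h.getD 0 0 = s.getD 0 0 :=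
          head_eq_of_perm_sorted h s hPH hsorted hperm hne
        have hlens : s.length = h.length := hperm.length_eq.symm
        rw [hhead, hlens]
        by_cases hK : s.getD 0 0 < K
        · rw [if_pos hK, if_pos hK]
          by_cases hL : h.length < 2
          · rw [if_pos hL, if_pos hL]
          · rw [if_neg hL, if_neg hL]
            -- destructure h and s
            obtain ⟨hd, tl, rfl⟩ := List.exists_cons_of_ne_nil hne
            obtain ⟨s0, st, rfl⟩ : ∃ a t, s = a :: t := by
              cases s with
              | nil => exact absurd hperm.length_eq (by simp)
              | cons a t => exact ⟨a, t, rfl⟩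
            obtain ⟨s1, s2, rfl⟩ : ∃ b t, st = b :: t := by
              cases st with
              | nil =>
                exfalso
                have h1 : (s0 :: ([] : List Int)).length = 1 := rfl
                have h2 : 2 ≤ (hd :: tl).length := Nat.le_of_not_lt hL
                omega
              | cons b t => exact ⟨b, t, rfl⟩
            have hhd : hd = s0 := by simpa [List.getD_cons_zero] using hhead
            -- first pop
            obtain ⟨hp1v, hp1p, hp1h⟩ := heappop_spec (hd :: tl) hPH (by simp)
            have htl : tl.Perm (s1 :: s2) := by
              rw [hhd] at hperm
              exact hperm.cons_inv
            have h1perm : (heappop (hd :: tl)).2.Perm (s1 :: s2) := hp1p.trans htl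
            have h1ne : (heappop (hd :: tl)).2 ≠ [] := by
              have := h1perm.length_eq
              intro hc
              rw [hc] at this
              simp at this
            -- second pop
            obtain ⟨hp2v, hp2p, hp2h⟩ := heappop_spec _ hp1h h1ne
            have hsorted1 : (s1 :: s2).Pairwise (· ≤ ·) := hsorted.of_cons
            have h1head : (heappop (hd :: tl)).2.getD 0 0 = s1 :=
              head_eq_of_perm_sorted _ _ hp1h hsorted1 h1perm h1ne
            have h2perm : (heappop (heappop (hd :: tl)).2).2.Perm s2 := by
              obtain ⟨a1, t1, he1⟩ := List.exists_cons_of_ne_nil h1ne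
              have ha1 : a1 = s1 := by
                rw [he1] at h1head
                simpa using h1head
              refine hp2p.trans ?_
              rw [he1]
              have hx : (a1 :: t1).Perm (s1 :: s2) := he1 ▸ h1perm
              rw [ha1] at hx
              simpa using hx.cons_inv
            -- values
            have hv1 : (heappop (hd :: tl)).1 = s0 := by rw [hp1v]; simpa using hhd
            have hv2 : (heappop (heappop (hd :: tl)).2).1 = s1 := by rw [hp2v]; exact h1head
            have hc : (heappop (hd :: tl)).1 + (heappop (heappop (hd :: tl)).2).1 * 2 =
                (s0 :: s1 :: s2).getD 0 0 + 2 * (s0 :: s1 :: s2).getD 1 0 := by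
              have hg0 : (s0 :: s1 :: s2).getD 0 0 = s0 := rfl
              have hg1 : (s0 :: s1 :: s2).getD 1 0 = s1 := rfl
              rw [hv1, hv2, hg0, hg1]
              ring
            -- push
            obtain ⟨hpushh, hpushp⟩ := heappush_spec (heappop (heappop (hd :: tl)).2).2
              ((heappop (hd :: tl)).1 + (heappop (heappop (hd :: tl)).2).1 * 2) hp2h
            have hdrop : (s0 :: s1 :: s2).drop 2 = s2 := by simp
            set c := (s0 :: s1 :: s2).getD 0 0 + 2 * (s0 :: s1 :: s2).getD 1 0 with hcdef
            rw [hdrop]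
            have hargperm : (heappush (heappop (heappop (hd :: tl)).2).2
                ((heappop (hd :: tl)).1 + (heappop (heappop (hd :: tl)).2).1 * 2)).Perm
                (insortB s2 c) := by
              refine hpushp.trans ?_
              rw [hc]
              exact ((h2perm.cons c).trans (insortB_perm s2 c).symm)
            have hargsorted : (insortB s2 c).Pairwise (· ≤ ·) :=
              insortB_pairwise s2 c hsorted1.of_cons
            -- lengths for the induction
            have hlen1 : (heappop (hd :: tl)).2.length = (hd :: tl).length - 1 :=
              length_heappop_snd _
            have hlen2 : (heappop (heappop (hd :: tl)).2).2.length =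
                (hd :: tl).length - 2 := by
              rw [length_heappop_snd, hlen1]
              omega
            have hlc : (hd :: tl).length = tl.length + 1 := by simp
            have hsc : (s0 :: s1 :: s2).length = s2.length + 2 := by simp
            apply ih fb _ _ (ans + 1)
            · rw [length_heappush, hlen2]
              omega
            · rw [length_insortB]
              have : (s0 :: s1 :: s2).length ≤ fb + 1 := hfb
              omega
            · exact hpushh
            · exact hargsorted
            · exact hargperm
        · rw [if_neg hK, if_neg hK]

-- ===== VERDICT (by name: the statement is the Claim_ definition above) =====
theorem solution_spec : Claim_equal_solution := by
  unfold Claim_equal_solution Spec_solution Pre_solution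
  intro scoville K _ hne
  unfold solution solution_alt
  dsimp only
  obtain ⟨hH, hHperm⟩ := heapify_spec scoville
  have hsperm : (PySem.List.sorted scoville (fun x => x) false).Perm scoville :=
    PySem.List.sorted_perm scoville (fun x => x) false
  have hsorted : (PySem.List.sorted scoville (fun x => x) false).Pairwise (· ≤ ·) := by
    have := PySem.List.sorted_pairwise scoville (fun x => x)
    simpa using this
  have hperm : (heapify scoville).Perm (PySem.List.sorted scoville (fun x => x) false) :=
    hHperm.trans hsperm.symm
  have hne2 : heapify scoville ≠ [] := by
    intro hc
    have hl := hHperm.length_eq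
    rw [hc] at hl
    simp at hl
    exact hne (List.length_eq_zero_iff.mp hl.symm)
  have hhead := head_eq_of_perm_sorted _ _ hH hsorted hperm hne2
  by_cases hK : (heapify scoville).getD 0 0 ≥ K
  · rw [if_pos hK]
    have hlen : (PySem.List.sorted scoville (fun x => x) false).length ≠ 0 := by
      intro hc
      exact hne2 (by
        have := hperm.length_eq
        rw [hc] at this
        exact List.length_eq_zero_iff.mp this)
    obtain ⟨m, hm⟩ : ∃ m, (PySem.List.sorted scoville (fun x => x) false).length = m + 1 :=
      ⟨_, (Nat.succ_pred_eq_of_ne_zero hlen).symm⟩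
    rw [hm]
    simp only [loopB]
    rw [if_neg (by rw [← hhead]; omega)]
  · rw [if_neg hK]
    exact loop_eq K (heapify scoville).length
      (PySem.List.sorted scoville (fun x => x) false).length _ _ 0
      (le_refl _) (le_refl _) hH hsorted hperm
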